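-- pv_equiv track=rewrite | github.com/shaby112/kuantra-app | backend/app/api/v1/endpoints/dashboards.py | _normalize_widget_rows
-- ===== SOURCE A (Python) =====
-- from typing import List, Dict, Any
--
-- def _normalize_widget_rows(data: Any) -> tuple[list[str], list[dict[str, Any]]]:
--     if not isinstance(data, list) or not data:
--         return [], []
--
--     first_row = data[0]
--     if isinstance(first_row, dict):
--         headers: list[str] = list(first_row.keys())
--         header_set = set(headers)
--         normalized_rows: list[dict[str, Any]] = []
--         for row in data:
--             if not isinstance(row, dict):
--                 continue
--             for key in row.keys():
--                 if key not in header_set: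
--                     headers.append(key)
--                     header_set.add(key)
--             normalized_rows.append(row)
--         return headers, normalized_rows
--
--     # Fallback for primitive arrays.
--     return ["value"], [{"value": row} for row in data]
-- ===== SOURCE B (Python) =====
-- from typing import Any
--
-- def _normalize_widget_rows(data: Any) -> tuple[list[str], list[dict[str, Any]]]:
--     if not isinstance(data, list) or not data:
--         return [], []
--     if isinstance(data[0], dict):
--         rows = [r for r in data if isinstance(r, dict)]
--         flat = [k for r in rows for k in r]
--         # first-occurrence index of each key: scan index/key pairs in reverse,
--         # so the overwrite surviving for each key is its smallest index
--         first = {k: i for i, k in reversed(list(enumerate(flat)))}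
--         # header order = ascending first-occurrence index (indices are distinct)
--         return sorted(first, key=first.get), rows
--     return ["value"], [{"value": r} for r in data]
-- ===== Notes on version B (the rewrite author's own statement) =====
-- stated objective: alternative
-- what changed: A's sequential dedup loop (grow headers with a seen-set while collecting rows) is replaced by a different algorithm: build a key->first-occurrence-index map by overwriting while scanning the flattened key stream in reverse, then obtain the header order by sorting the keys by that index.
import Mathlib
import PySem

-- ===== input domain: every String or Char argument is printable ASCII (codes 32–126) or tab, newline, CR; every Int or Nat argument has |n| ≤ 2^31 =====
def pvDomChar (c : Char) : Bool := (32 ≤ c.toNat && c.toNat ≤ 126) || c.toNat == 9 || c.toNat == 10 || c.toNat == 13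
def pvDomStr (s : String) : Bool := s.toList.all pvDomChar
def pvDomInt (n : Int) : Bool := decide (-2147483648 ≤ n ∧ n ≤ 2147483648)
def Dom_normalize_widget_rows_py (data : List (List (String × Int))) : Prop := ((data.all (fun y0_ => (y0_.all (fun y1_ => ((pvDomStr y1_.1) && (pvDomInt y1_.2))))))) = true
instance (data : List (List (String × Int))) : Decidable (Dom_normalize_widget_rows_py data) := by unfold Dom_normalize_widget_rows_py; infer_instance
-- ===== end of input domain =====

-- B replaces A's sequential seen-set dedup loop by a different algorithm: build a
-- key -> first-occurrence-index map by overwriting while scanning the flattened key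
-- stream in reverse, then sort the keys by that index (objective: alternative).
-- Under the typed domain every row is a dict, so the isinstance guards and the
-- primitive-array fallback of both Pythons are unreachable and ported away as comments.

-- ===== PORT A =====
-- row.keys(): the keys of the Python dict the association list represents,
-- each once, in first-occurrence order (exact: Python dict keys are distinct).
def pyKeys (row : List (String × Int)) : List String :=
  PySem.List.dedup (row.map Prod.fst)

-- inner loop: `for key in row.keys(): if key not in header_set: append/add`
def rowStep (p : List String × PySem.Set String) (k : String) :
    List String × PySem.Set String :=
  if p.2.contains k then p else (p.1 ++ [k], p.2.add k)

-- outer loop body: `for row in data:` (the isinstance-dict test is always true here)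
def outerStep (st : (List String × PySem.Set String) × List (List (String × Int)))
    (row : List (String × Int)) :
    (List String × PySem.Set String) × List (List (String × Int)) :=
  ((pyKeys row).foldl rowStep st.1, st.2 ++ [row])

def normalize_widget_rows_py (data : List (List (String × Int))) :
    List String × (List (List (String × Int))) :=
  match data with
  | [] => ([], [])   -- `not data` guard
  | first_row :: _ =>
    -- first_row is a dict under this typing
    let headers := pyKeys first_row                      -- list(first_row.keys())
    let header_set : PySem.Set String := PySem.Set.ofList headers
    let res := data.foldl outerStep ((headers, header_set), [])
    (res.1.1, res.2)

-- ===== PORT B =====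
-- {k: i for i, k in reversed(list(enumerate(flat)))}
def firstDict (flat : List String) : PySem.Dict String Int :=
  ((PySem.List.enumerate flat 0).reverse).foldl (fun d p => d.insert p.2 p.1) PySem.Dict.empty

def normalize_widget_rows_py_alt (data : List (List (String × Int))) :
    List String × (List (List (String × Int))) :=
  match data with
  | [] => ([], [])   -- `not data` guard
  | _ :: _ =>
    -- [r for r in data if isinstance(r, dict)] : the filter is identically true here
    let rows := data
    -- flat = [k for r in rows for k in r]
    let flat := rows.flatMap pyKeys
    let first := firstDict flat
    -- sorted(first, key=first.get): dict iteration = first.keys, sort by first index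
    (PySem.List.sorted first.keys (fun k => first.getD k 0) false, rows)

-- ===== PRECONDITION & SPEC =====
def Spec_normalize_widget_rows_py (data : List (List (String × Int))) (out : List String × (List (List (String × Int)))) : Prop := out = normalize_widget_rows_py_alt data
instance (data : List (List (String × Int))) (out : List String × (List (List (String × Int)))) : Decidable (Spec_normalize_widget_rows_py data out) := by unfold Spec_normalize_widget_rows_py; infer_instance

-- ===== CLAIM =====
def Claim_equal_normalize_widget_rows_py : Prop := ∀ (data : List (List (String × Int))), Dom_normalize_widget_rows_py data → Spec_normalize_widget_rows_py data (normalize_widget_rows_py data)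

-- ===== LEMMAS AND PROOFS =====

theorem add_of_mem {α : Type} [BEq α] [LawfulBEq α] (s : PySem.Set α) (x : α) (h : x ∈ s) :
    s.add x = s := by
  unfold PySem.Set.add; simp_all

theorem add_of_not_mem {α : Type} [BEq α] [LawfulBEq α] (s : PySem.Set α) (x : α) (h : x ∉ s) :
    s.add x = s ++ [x] := by
  unfold PySem.Set.add; simp_all

-- adding an already-present batch of elements is a no-op
theorem foldl_add_of_subset {α : Type} [BEq α] [LawfulBEq α]
    (t : List α) (s : PySem.Set α) (h : ∀ x ∈ t, x ∈ s) :
    t.foldl PySem.Set.add s = s := by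
  induction t with
  | nil => rfl
  | cons a t ih =>
    simp only [List.foldl_cons, add_of_mem s a (h a (by simp))]
    exact ih (fun x hx => h x (by simp [hx]))

-- the inner loop preserves `snd = ofList fst` and acts as foldl add on fst
theorem rowStep_foldl (ks : List String) (hs : List String) :
    ks.foldl rowStep (hs, PySem.Set.ofList hs)
      = (ks.foldl PySem.Set.add hs, PySem.Set.ofList (ks.foldl PySem.Set.add hs)) := by
  induction ks generalizing hs with
  | nil => rfl
  | cons k ks ih =>
    by_cases hk : k ∈ hs
    · have h1 : rowStep (hs, PySem.Set.ofList hs) k = (hs, PySem.Set.ofList hs) := by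
        unfold rowStep
        simp_all [PySem.Set.mem_ofList]
      have h2 : PySem.Set.add hs k = hs := add_of_mem hs k hk
      simp only [List.foldl_cons, h1, h2, ih]
    · have hadd : (PySem.Set.ofList hs).add k = PySem.Set.ofList (hs ++ [k]) := by
        rw [PySem.Set.ofList_eq_foldl (hs ++ [k]), List.foldl_append,
          ← PySem.Set.ofList_eq_foldl hs]
        rfl
      have h1 : rowStep (hs, PySem.Set.ofList hs) k
          = (hs ++ [k], PySem.Set.ofList (hs ++ [k])) := by
        unfold rowStep
        have hc : (PySem.Set.ofList hs).contains k ≠ true := by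
          simp_all [PySem.Set.mem_ofList]
        simp only [hc, if_false, Bool.false_eq_true, hadd]
      have h2 : PySem.Set.add hs k = hs ++ [k] := add_of_not_mem hs k hk
      simp only [List.foldl_cons, h1, h2, ih]

-- the outer loop: headers fold over the concatenated key lists, rows accumulate
theorem outer_foldl (rows : List (List (String × Int))) (hs : List String)
    (acc : List (List (String × Int))) :
    rows.foldl outerStep ((hs, PySem.Set.ofList hs), acc)
      = ((((rows.flatMap pyKeys).foldl PySem.Set.add hs),
          PySem.Set.ofList ((rows.flatMap pyKeys).foldl PySem.Set.add hs)),
         acc ++ rows) := by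
  induction rows generalizing hs acc with
  | nil => simp
  | cons r rows ih =>
    simp only [List.foldl_cons, List.flatMap_cons, List.foldl_append]
    have h1 : outerStep ((hs, PySem.Set.ofList hs), acc) r
        = (((pyKeys r).foldl PySem.Set.add hs,
            PySem.Set.ofList ((pyKeys r).foldl PySem.Set.add hs)), acc ++ [r]) := by
      unfold outerStep
      simp [rowStep_foldl]
    rw [h1, ih]
    simp

-- folding Set.add from a seed set appends exactly the new first occurrences
theorem foldl_add_eq_append_filter {α : Type} [BEq α] [LawfulBEq α]
    (t : List α) (s : List α) :
    t.foldl PySem.Set.add s = s ++ (PySem.List.dedup t).filter (fun y => !(s.contains y)) := by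
  induction t generalizing s with
  | nil => simp
  | cons x t ih =>
    have hded : PySem.List.dedup (x :: t)
        = x :: (PySem.List.dedup t).filter (fun y => !(([x] : List α).contains y)) := by
      rw [PySem.List.dedup_eq_ofList, PySem.Set.ofList_eq_foldl, List.foldl_cons]
      have h0 : PySem.Set.add ([] : List α) x = [x] := by rfl
      rw [h0, ih [x]]
      simp [PySem.List.dedup_eq_ofList, PySem.Set.ofList_eq_foldl]
    rw [List.foldl_cons, hded]
    by_cases hx : x ∈ s
    · rw [add_of_mem s x hx, ih s]
      congr 1
      simp only [List.filter_cons]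
      have h1 : (!s.contains x) = false := by simp [hx]
      rw [h1]
      simp only [List.filter_filter]
      apply List.filter_congr
      intro y hy
      by_cases hys : y ∈ s
      · simp [hys]
      · have hyx : y ≠ x := fun h => hys (h ▸ hx)
        simp [hys, hyx]
    · rw [add_of_not_mem s x hx, ih (s ++ [x])]
      simp only [List.append_assoc, List.singleton_append]
      congr 1
      simp only [List.filter_cons]
      have h1 : (!s.contains x) = true := by simp [hx]
      rw [h1]
      simp only [List.filter_filter, if_true]
      congr 1
      apply List.filter_congr
      intro y hy
      by_cases hys : y ∈ s <;> by_cases hyx : y = x <;> simp_all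

-- dedup, looked at from the front
theorem dedup_cons {α : Type} [BEq α] [LawfulBEq α] (x : α) (t : List α) :
    PySem.List.dedup (x :: t) = x :: (PySem.List.dedup t).filter (fun y => !(y == x)) := by
  rw [PySem.List.dedup_eq_ofList, PySem.Set.ofList_eq_foldl, List.foldl_cons]
  have h0 : PySem.Set.add ([] : List α) x = [x] := by rfl
  rw [h0, foldl_add_eq_append_filter t [x]]
  simp

-- folding add over a fresh nodup list just appends it
theorem foldl_add_of_nodup_disjoint {α : Type} [BEq α] [LawfulBEq α]
    (t : List α) (s : PySem.Set α) (hn : t.Nodup) (hd : ∀ x ∈ t, x ∉ s) :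
    t.foldl PySem.Set.add s = s ++ t := by
  induction t generalizing s with
  | nil => simp
  | cons a t ih =>
    simp only [List.foldl_cons, add_of_not_mem s a (hd a (by simp))]
    rw [ih (s ++ [a]) (List.nodup_cons.mp hn).2]
    · simp
    · intro x hx
      simp only [List.mem_append, List.mem_singleton]
      rintro (h | rfl)
      · exact hd x (by simp [hx]) h
      · exact (List.nodup_cons.mp hn).1 hx

theorem ofList_idem' {α : Type} [BEq α] [LawfulBEq α] (xs : List α) :
    PySem.Set.ofList (PySem.Set.ofList xs) = PySem.Set.ofList xs := by
  rw [PySem.Set.ofList_eq_foldl (PySem.Set.ofList xs)]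
  have h := foldl_add_of_nodup_disjoint (PySem.Set.ofList xs) ([] : PySem.Set α)
    (PySem.Set.nodup_ofList xs) (by simp)
  simpa using h

-- A's headers are the ordered dedup of the flattened key stream
theorem normA (first : List (String × Int)) (rest : List (List (String × Int))) :
    normalize_widget_rows_py (first :: rest)
      = (PySem.List.dedup ((first :: rest).flatMap pyKeys), first :: rest) := by
  unfold normalize_widget_rows_py
  simp only
  rw [outer_foldl]
  simp only [List.nil_append, Prod.mk.injEq, and_true]
  have hK : (first :: rest).flatMap pyKeys = pyKeys first ++ rest.flatMap pyKeys := by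
    simp
  rw [hK, List.foldl_append]
  rw [foldl_add_of_subset (pyKeys first) (pyKeys first) (fun x hx => hx)]
  rw [PySem.List.dedup_eq_ofList, PySem.Set.ofList_eq_foldl, List.foldl_append,
    ← PySem.Set.ofList_eq_foldl]
  have hid : PySem.Set.ofList (pyKeys first) = pyKeys first := by
    unfold pyKeys
    rw [PySem.List.dedup_eq_ofList, ofList_idem']
  rw [hid]

-- generalized dict of the reversed enumeration, for induction
def firstDictFrom (flat : List String) (s : Int) : PySem.Dict String Int :=
  ((PySem.List.enumerate flat s).reverse).foldl (fun d p => d.insert p.2 p.1) PySem.Dict.empty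

theorem firstDictFrom_cons (x : String) (t : List String) (s : Int) :
    firstDictFrom (x :: t) s = (firstDictFrom t (s + 1)).insert x s := by
  unfold firstDictFrom
  rw [PySem.List.enumerate_cons, List.reverse_cons, List.foldl_append]
  rfl

-- the surviving value for each key is its FIRST index
theorem firstDictFrom_get? (t : List String) (s : Int) (k : String) :
    (firstDictFrom t s).get? k = (t.idxOf? k).map (fun n => s + (n : Int)) := by
  induction t generalizing s with
  | nil => rfl
  | cons x t ih =>
    rw [firstDictFrom_cons, List.idxOf?_cons]
    by_cases hk : k = x
    · subst hk
      rw [PySem.Dict.get?_insert_self]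
      simp
    · rw [PySem.Dict.get?_insert_of_ne _ s hk, ih]
      have hx : (x == k) = false := by simp [Ne.symm hk]
      rw [hx]
      cases h : List.idxOf? k t with
      | none => simp
      | some n => simp; omega

theorem mem_keys_firstDictFrom (t : List String) (s : Int) (k : String) :
    k ∈ (firstDictFrom t s).keys ↔ k ∈ t := by
  induction t generalizing s with
  | nil =>
    constructor
    · intro h
      exact absurd h (by simp [firstDictFrom, PySem.List.enumerate_nil, PySem.Dict.keys, PySem.Dict.empty])
    · intro h; simp at h
  | cons x t ih =>
    rw [firstDictFrom_cons, PySem.Dict.mem_keys_insert]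
    simp [ih]

theorem nodup_keys_firstDictFrom (t : List String) (s : Int) :
    (firstDictFrom t s).keys.Nodup := by
  unfold firstDictFrom
  exact PySem.Dict.nodup_keys_foldl_insert_key
    ((PySem.List.enumerate t s).reverse) (fun p => p.2) (fun _ p => p.1)
    PySem.Dict.empty (by simp [PySem.Dict.keys, PySem.Dict.empty])

-- the ordered dedup is strictly increasing under the first-index key
theorem dedup_pairwise_idx (t : List String) :
    (PySem.List.dedup t).Pairwise (fun a b => ∀ na nb,
      t.idxOf? a = some na → t.idxOf? b = some nb → na < nb) := by
  induction t with
  | nil => simp [PySem.List.dedup_eq_ofList]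
  | cons x t ih =>
    rw [dedup_cons]
    constructor
    · -- head vs every member of the filtered tail
      intro b hb na nb ha hbidx
      have hbne : b ≠ x := by
        have := (List.mem_filter.mp hb).2
        simpa using this
      rw [List.idxOf?_cons] at ha hbidx
      simp at ha
      have hxb : (x == b) = false := by simp [Ne.symm hbne]
      rw [hxb] at hbidx
      simp at hbidx
      omega
    · -- pairwise inside the filtered tail
      have hf := List.Pairwise.filter (fun y => !(y == x)) ih
      refine hf.imp_of_mem ?_
      intro a b ha hb h na nb haidx hbidx
      have hane : a ≠ x := by have := (List.mem_filter.mp ha).2; simpa using this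
      have hbne : b ≠ x := by have := (List.mem_filter.mp hb).2; simpa using this
      rw [List.idxOf?_cons] at haidx hbidx
      rw [show (x == a) = false by simp [Ne.symm hane]] at haidx
      rw [show (x == b) = false by simp [Ne.symm hbne]] at hbidx
      simp at haidx hbidx
      obtain ⟨ma, hma, rfl⟩ := haidx
      obtain ⟨mb, hmb, rfl⟩ := hbidx
      have := h ma mb hma hmb
      omega

theorem idxOf?_isSome_of_mem (l : List String) (a : String) (h : a ∈ l) :
    ∃ n, l.idxOf? a = some n := by
  rw [← Option.isSome_iff_exists]
  induction l with
  | nil => simp at h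
  | cons x t ih =>
    rw [List.idxOf?_cons]
    by_cases hx : x = a
    · simp [hx]
    · have : a ∈ t := by rcases List.mem_cons.mp h with h'|h'; exact absurd h'.symm hx; exact h'
      simp [hx, ih this]

-- B's sort reproduces first-occurrence order
theorem normB (flat : List String) :
    PySem.List.sorted (firstDict flat).keys (fun k => (firstDict flat).getD k 0) false
      = PySem.List.dedup flat := by
  have hfd : firstDict flat = firstDictFrom flat 0 := rfl
  apply PySem.List.sorted_eq_of_perm_of_pairwise_lt
  · -- (dedup flat).Perm keys
    refine (List.perm_ext_iff_of_nodup (PySem.List.nodup_dedup flat)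
      (hfd ▸ nodup_keys_firstDictFrom flat 0)).mpr ?_
    intro a
    rw [PySem.List.mem_dedup, hfd, mem_keys_firstDictFrom]
  · -- strict pairwise under the first-index key
    have hkey : ∀ a ∈ flat, ∀ na, flat.idxOf? a = some na →
        (firstDict flat).getD a 0 = (na : Int) := by
      intro a ha na hna
      rw [PySem.Dict.getD_eq_get?_getD, hfd, firstDictFrom_get?, hna]
      simp
    refine (dedup_pairwise_idx flat).imp_of_mem ?_
    intro a b ha hb h
    have ha' : a ∈ flat := (PySem.List.mem_dedup flat a).mp ha
    have hb' : b ∈ flat := (PySem.List.mem_dedup flat b).mp hb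
    obtain ⟨na, hna⟩ := idxOf?_isSome_of_mem flat a ha'
    obtain ⟨nb, hnb⟩ := idxOf?_isSome_of_mem flat b hb'
    rw [hkey a ha' na hna, hkey b hb' nb hnb]
    exact_mod_cast h na nb hna hnb

-- ===== VERDICT (by name: the statement is the Claim_ definition above) =====
theorem normalize_widget_rows_py_spec : Claim_equal_normalize_widget_rows_py := by
  intro data _
  unfold Spec_normalize_widget_rows_py
  cases data with
  | nil => rfl
  | cons first rest =>
    rw [normA]
    unfold normalize_widget_rows_py_alt
    simp only
    rw [normB]
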